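-- pv_equiv track=rewrite | github.com/workspacejashan/scout-mvp | backend/app/services/phones.py | tag_inbound_heuristic
-- ===== SOURCE A (Python) =====
-- def looks_like_opt_out(body: str) -> bool:
--     s = (body or "").strip().lower()
--     if not s:
--         return False
--     # Twilio standard STOP keywords (+ common variants).
--     return s in {"stop", "stopall", "unsubscribe", "cancel", "end", "quit"}
--
-- def tag_inbound_heuristic(body: str) -> str:
--     """
--     Minimal v1 tagging. We’ll add LLM tagging later.
--     Returns one of:
--     Interested | Not Interested | Wrong Number | Ask Later | Unsubscribe | Unknown
--     """
--     s = (body or "").strip().lower()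
--     if not s:
--         return "Unknown"
--
--     if looks_like_opt_out(s):
--         return "Unsubscribe"
--
--     if any(p in s for p in ["wrong number", "wrong #", "not me", "not the right", "you got the wrong"]):
--         return "Wrong Number"
--
--     if any(p in s for p in ["not interested", "no thanks", "no thank", "not looking", "stop texting"]):
--         return "Not Interested"
--
--     if any(p in s for p in ["later", "not now", "next week", "next month", "follow up", "reach out"]):
--         return "Ask Later"
--
--     if any(p in s for p in ["interested", "yes", "sure", "tell me more", "sounds good"]):
--         return "Interested"
--
--     return "Unknown"
-- ===== SOURCE B (Python) =====
-- OPT_OUT = {"stop", "stopall", "unsubscribe", "cancel", "end", "quit"}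
--
-- TAGS = ["Wrong Number", "Not Interested", "Ask Later", "Interested"]
--
-- KEYWORD_PRIORITY = {}
-- for _pr, _kws in enumerate([
--         ["wrong number", "wrong #", "not me", "not the right", "you got the wrong"],
--         ["not interested", "no thanks", "no thank", "not looking", "stop texting"],
--         ["later", "not now", "next week", "next month", "follow up", "reach out"],
--         ["interested", "yes", "sure", "tell me more", "sounds good"]]):
--     for _kw in _kws:
--         KEYWORD_PRIORITY[_kw] = _pr
--
-- def tag_inbound_heuristic(body: str) -> str:
--     s = (body or "").strip().lower()
--     if not s:
--         return "Unknown"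
--     if s in OPT_OUT:
--         return "Unsubscribe"
--     # Single sweep over text positions: keep the minimum priority of any
--     # keyword that starts at some position; min priority = first rule in order.
--     best = len(TAGS)
--     for i in range(len(s)):
--         for kw, pr in KEYWORD_PRIORITY.items():
--             if pr < best and s.startswith(kw, i):
--                 best = pr
--     return TAGS[best] if best < len(TAGS) else "Unknown"
-- ===== Notes on version B (the rewrite author's own statement) =====
-- stated objective: alternative
-- what changed: Instead of an ordered if-chain doing a substring search per rule, B sweeps the normalized text once position by position, matching every keyword at each position against a keyword-to-priority map and keeping the minimum matched priority as an accumulator, then indexes the tag table with it.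
import Mathlib
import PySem

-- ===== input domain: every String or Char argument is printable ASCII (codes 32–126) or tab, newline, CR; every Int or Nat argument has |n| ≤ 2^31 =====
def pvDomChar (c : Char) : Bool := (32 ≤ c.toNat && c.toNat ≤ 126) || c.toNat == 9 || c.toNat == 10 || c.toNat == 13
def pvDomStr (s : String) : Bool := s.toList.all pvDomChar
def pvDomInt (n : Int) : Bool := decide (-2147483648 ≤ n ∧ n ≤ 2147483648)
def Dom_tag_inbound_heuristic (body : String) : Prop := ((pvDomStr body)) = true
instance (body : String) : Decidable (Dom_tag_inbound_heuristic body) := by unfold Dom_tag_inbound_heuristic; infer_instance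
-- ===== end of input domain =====

-- B replaces A's ordered if-chain of per-rule substring searches by a single position-by-position
-- sweep of the normalized text that keeps the minimum matched keyword priority (objective: alternative).

-- ===== PORT A =====
-- looks_like_opt_out: re-strips and re-lowers its argument, then exact set membership
-- (the Python set literal membership 's in {...}' is ported as membership in the literal list of its elements; exact).
def pvLooksLikeOptOut (body : String) : Bool :=
  let s := PySem.Str.lower (PySem.Str.strip body)
  if s = "" then false
  else decide (s ∈ ["stop", "stopall", "unsubscribe", "cancel", "end", "quit"])

def tag_inbound_heuristic (body : String) : String :=
  let s := PySem.Str.lower (PySem.Str.strip body)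
  if s = "" then "Unknown"
  else if pvLooksLikeOptOut s then "Unsubscribe"
  else if (["wrong number", "wrong #", "not me", "not the right", "you got the wrong"].any
            (fun p => PySem.Str.isIn p s)) then "Wrong Number"
  else if (["not interested", "no thanks", "no thank", "not looking", "stop texting"].any
            (fun p => PySem.Str.isIn p s)) then "Not Interested"
  else if (["later", "not now", "next week", "next month", "follow up", "reach out"].any
            (fun p => PySem.Str.isIn p s)) then "Ask Later"
  else if (["interested", "yes", "sure", "tell me more", "sounds good"].any
            (fun p => PySem.Str.isIn p s)) then "Interested"
  else "Unknown"

-- ===== PORT B =====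
def pvOptOut : List String := ["stop", "stopall", "unsubscribe", "cancel", "end", "quit"]

def pvTags : List String := ["Wrong Number", "Not Interested", "Ask Later", "Interested"]

-- KEYWORD_PRIORITY: dict keyword -> rule priority, in insertion order (association list).
def pvKwPr : List (String × Nat) :=
  [("wrong number", 0), ("wrong #", 0), ("not me", 0), ("not the right", 0), ("you got the wrong", 0),
   ("not interested", 1), ("no thanks", 1), ("no thank", 1), ("not looking", 1), ("stop texting", 1),
   ("later", 2), ("not now", 2), ("next week", 2), ("next month", 2), ("follow up", 2), ("reach out", 2),
   ("interested", 3), ("yes", 3), ("sure", 3), ("tell me more", 3), ("sounds good", 3)]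

def tag_inbound_heuristic_alt (body : String) : String :=
  let s := PySem.Str.lower (PySem.Str.strip body)
  if s = "" then "Unknown"
  else if decide (s ∈ pvOptOut) then "Unsubscribe"
  else
    let sl := s.toList
    -- for i in range(len(s)): for kw, pr in KEYWORD_PRIORITY.items(): if pr < best and s.startswith(kw, i): best = pr
    -- (Python s.startswith(kw, i) with 0 ≤ i is exactly a prefix test on the drop-i suffix)
    let best := (List.range sl.length).foldl
      (fun b i => pvKwPr.foldl
        (fun b kp => if kp.2 < b ∧ PySem.Chars.startswith (sl.drop i) kp.1.toList then kp.2 else b) b) 4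
    -- TAGS[best] if best < len(TAGS) else "Unknown" (in-range literal indexing)
    if best < 4 then pvTags.getD best "Unknown" else "Unknown"

-- ===== PRECONDITION & SPEC =====
def Spec_tag_inbound_heuristic (body : String) (out : String) : Prop := out = tag_inbound_heuristic_alt body
instance (body : String) (out : String) : Decidable (Spec_tag_inbound_heuristic body out) := by unfold Spec_tag_inbound_heuristic; infer_instance

-- ===== CLAIM (what is proved, stated in full; the proofs are below) =====
def Claim_equal_tag_inbound_heuristic : Prop := ∀ (body : String), Dom_tag_inbound_heuristic body → Spec_tag_inbound_heuristic body (tag_inbound_heuristic body)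


-- ===== LEMMAS AND PROOFS =====

-- normalization: strip/lower is idempotent under A's helper's re-normalization
theorem pv_isspace_false (x : Char) (h : 65 ≤ x.toNat ∧ x.toNat ≤ 122) :
    PySem.Chars.isspace x = false := by
  unfold PySem.Chars.isspace
  simp only [Bool.or_eq_false_iff, Bool.and_eq_false_iff, decide_eq_false_iff_not]
  omega

theorem pv_isspace_lowerChar (c : Char) :
    PySem.Chars.isspace (PySem.Chars.lowerChar c) = PySem.Chars.isspace c := by
  unfold PySem.Chars.lowerChar
  split
  · next h =>
    unfold PySem.Chars.isupper at h
    simp only [Bool.and_eq_true, decide_eq_true_eq, Char.le_def] at h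
    have hn : 65 ≤ c.toNat ∧ c.toNat ≤ 90 := by
      constructor <;> [exact UInt32.le_iff_toNat_le.mp h.1; exact UInt32.le_iff_toNat_le.mp h.2]
    have hv : (c.toNat + 32).isValidChar := by left; omega
    have h1 : (Char.ofNat (c.toNat + 32)).toNat = c.toNat + 32 := by
      rw [Char.toNat_ofNat, if_pos hv]
    rw [pv_isspace_false _ (by rw [h1]; omega), pv_isspace_false c (by omega)]
  · rfl

theorem pv_lowerChar_idem (c : Char) :
    PySem.Chars.lowerChar (PySem.Chars.lowerChar c) = PySem.Chars.lowerChar c := by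
  unfold PySem.Chars.lowerChar
  split
  · next h =>
    unfold PySem.Chars.isupper at h
    simp only [Bool.and_eq_true, decide_eq_true_eq, Char.le_def] at h
    have hn : 65 ≤ c.toNat ∧ c.toNat ≤ 90 := by
      constructor <;> [exact UInt32.le_iff_toNat_le.mp h.1; exact UInt32.le_iff_toNat_le.mp h.2]
    have hv : (c.toNat + 32).isValidChar := by left; omega
    have h1 : (Char.ofNat (c.toNat + 32)).toNat = c.toNat + 32 := by
      rw [Char.toNat_ofNat, if_pos hv]
    rw [if_neg]
    unfold PySem.Chars.isupper
    simp only [Bool.and_eq_true, decide_eq_true_eq, Char.le_def, not_and]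
    intro _ hle
    have h3 : (Char.ofNat (c.toNat + 32)).toNat ≤ ('Z' : Char).toNat :=
      UInt32.le_iff_toNat_le.mp hle
    have hz : ('Z' : Char).toNat = 90 := by decide
    rw [h1, hz] at h3
    omega
  · rfl

theorem pv_dropWhile_self {α : Type} (p : α → Bool) (l : List α) :
    List.dropWhile p (List.dropWhile p l) = List.dropWhile p l := by
  rw [List.dropWhile_eq_self_iff]
  intro hl
  have hne : List.dropWhile p l ≠ [] := by
    intro h; rw [h] at hl; simp at hl
  have := List.head_dropWhile_not p hne
  rw [List.head_eq_getElem] at this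
  simp [this]

theorem pv_dropWhile_prefix {α : Type} (p : α → Bool) {l m : List α}
    (hm : m <+: l) (hl : List.dropWhile p l = l) : List.dropWhile p m = m := by
  rw [List.dropWhile_eq_self_iff] at hl ⊢
  intro hlen
  obtain ⟨t, rfl⟩ := hm
  have h0 : 0 < (m ++ t).length := by simp; omega
  have := hl h0
  rwa [List.getElem_append_left hlen] at this

theorem pv_lstrip_lower (l : List Char) :
    PySem.Chars.lstrip (PySem.Chars.lower l) = PySem.Chars.lower (PySem.Chars.lstrip l) := by
  unfold PySem.Chars.lstrip PySem.Chars.lower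
  rw [List.dropWhile_map]
  congr 1
  have : (PySem.Chars.isspace ∘ PySem.Chars.lowerChar) = PySem.Chars.isspace := by
    funext c; exact pv_isspace_lowerChar c
  rw [this]

theorem pv_rstrip_lower (l : List Char) :
    PySem.Chars.rstrip (PySem.Chars.lower l) = PySem.Chars.lower (PySem.Chars.rstrip l) := by
  unfold PySem.Chars.rstrip PySem.Chars.lower
  rw [← List.map_reverse, List.dropWhile_map]
  have : (PySem.Chars.isspace ∘ PySem.Chars.lowerChar) = PySem.Chars.isspace := by
    funext c; exact pv_isspace_lowerChar c
  rw [this, List.map_reverse]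

theorem pv_strip_lower (l : List Char) :
    PySem.Chars.strip (PySem.Chars.lower l) = PySem.Chars.lower (PySem.Chars.strip l) := by
  unfold PySem.Chars.strip
  rw [pv_lstrip_lower, pv_rstrip_lower]

theorem pv_lower_lower (l : List Char) :
    PySem.Chars.lower (PySem.Chars.lower l) = PySem.Chars.lower l := by
  unfold PySem.Chars.lower
  rw [List.map_map]
  congr 1
  funext c; exact pv_lowerChar_idem c

theorem pv_strip_strip (l : List Char) :
    PySem.Chars.strip (PySem.Chars.strip l) = PySem.Chars.strip l := by
  unfold PySem.Chars.strip PySem.Chars.lstrip PySem.Chars.rstrip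
  generalize hml : List.dropWhile PySem.Chars.isspace l = m
  have hm : List.dropWhile PySem.Chars.isspace m = m := by
    rw [← hml]; exact pv_dropWhile_self _ _
  have hrpre : (List.dropWhile PySem.Chars.isspace m.reverse).reverse <+: m := by
    have h := List.dropWhile_suffix (l := m.reverse) PySem.Chars.isspace
    have h2 := List.reverse_prefix.mpr h
    rwa [List.reverse_reverse] at h2
  rw [pv_dropWhile_prefix PySem.Chars.isspace hrpre hm, List.reverse_reverse,
    pv_dropWhile_self]

theorem pv_s_fix (s : String) :
    PySem.Str.lower (PySem.Str.strip (PySem.Str.lower (PySem.Str.strip s)))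
      = PySem.Str.lower (PySem.Str.strip s) := by
  apply String.toList_inj.mp
  simp only [PySem.Str.toList_lower, PySem.Str.toList_strip]
  rw [pv_strip_lower, pv_lower_lower, pv_strip_strip]

-- the flattened (position, keyword-entry) matches and their priorities
def pvVals (sl : List Char) : List Nat :=
  ((((List.range sl.length).flatMap (fun i => pvKwPr.map (fun kp => (i, kp)))).filter
    (fun x => PySem.Chars.startswith (List.drop x.1 sl) x.2.1.toList)).map (fun x => x.2.2))

-- group keywords by priority, as in A's chain
def pvGroup : Nat → List String
  | 0 => ["wrong number", "wrong #", "not me", "not the right", "you got the wrong"]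
  | 1 => ["not interested", "no thanks", "no thank", "not looking", "stop texting"]
  | 2 => ["later", "not now", "next week", "next month", "follow up", "reach out"]
  | 3 => ["interested", "yes", "sure", "tell me more", "sounds good"]
  | _ => []

def pvMatched (sl : List Char) (p : Nat) : Prop :=
  ∃ kp ∈ pvKwPr, kp.2 = p ∧ PySem.Chars.isIn kp.1.toList sl = true

theorem pv_foldl_min_filter {α : Type} (cond : α → Bool) (val : α → Nat) (l : List α) (b : Nat) :
    l.foldl (fun b x => if val x < b ∧ cond x = true then val x else b) b
      = ((l.filter cond).map val).foldl min b := by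
  induction l generalizing b with
  | nil => rfl
  | cons x t ih =>
    simp only [List.foldl_cons, List.filter_cons]
    by_cases hc : cond x = true
    · have h1 : (if val x < b ∧ cond x = true then val x else b) = min b (val x) := by
        simp only [hc, and_true, min_def]
        split_ifs <;> omega
      rw [h1, hc]
      simp only [List.map_cons, List.foldl_cons, if_true]

      exact ih (min b (val x))
    · have h1 : (if val x < b ∧ cond x = true then val x else b) = b := by
        simp [hc]
      rw [h1, if_neg (by simpa using hc)]
      exact ih b

theorem pv_foldl_min_le (l : List Nat) (b : Nat) : l.foldl min b ≤ b := by
  induction l generalizing b with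
  | nil => simp
  | cons x t ih =>
    simp only [List.foldl_cons]
    exact le_trans (ih (min b x)) (min_le_left b x)

theorem pv_foldl_min_le_mem (l : List Nat) : ∀ (b x : Nat), x ∈ l → l.foldl min b ≤ x := by
  induction l with
  | nil => intro b x h; simp at h
  | cons y t ih =>
    intro b x h
    simp only [List.foldl_cons]
    rcases List.mem_cons.mp h with rfl | h
    · exact le_trans (pv_foldl_min_le t (min b x)) (min_le_right b x)
    · exact ih (min b y) x h

theorem pv_foldl_min_mem (l : List Nat) (b : Nat) :
    l.foldl min b = b ∨ l.foldl min b ∈ l := by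
  induction l generalizing b with
  | nil => left; rfl
  | cons x t ih =>
    simp only [List.foldl_cons]
    rcases ih (min b x) with h | h
    · rcases Nat.le_total b x with hbx | hbx
      · left; rw [h]; omega
      · right
        have hx : min b x = x := by omega
        rw [h, hx]; exact List.mem_cons_self
    · right; exact List.mem_cons_of_mem _ h

-- B's fold computes the minimum of 4 and all matched priorities
theorem pv_best_eq (sl : List Char) :
    (List.range sl.length).foldl
      (fun b i => pvKwPr.foldl
        (fun b kp => if kp.2 < b ∧ PySem.Chars.startswith (List.drop i sl) kp.1.toList then kp.2 else b) b) 4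
    = (pvVals sl).foldl min 4 := by
  unfold pvVals
  have h2 : ((List.range sl.length).flatMap (fun i => pvKwPr.map (fun kp => (i, kp)))).foldl
        (fun b (x : Nat × (String × Nat)) =>
          if x.2.2 < b ∧ PySem.Chars.startswith (List.drop x.1 sl) x.2.1.toList then x.2.2 else b) 4
      = (List.range sl.length).foldl
          (fun b i => (pvKwPr.map (fun kp => (i, kp))).foldl
            (fun b (x : Nat × (String × Nat)) =>
              if x.2.2 < b ∧ PySem.Chars.startswith (List.drop x.1 sl) x.2.1.toList then x.2.2 else b) b) 4 :=
    List.foldl_flatMap ..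
  have h3 := pv_foldl_min_filter
      (fun x : Nat × (String × Nat) => PySem.Chars.startswith (List.drop x.1 sl) x.2.1.toList)
      (fun x : Nat × (String × Nat) => x.2.2)
      ((List.range sl.length).flatMap (fun i => pvKwPr.map (fun kp => (i, kp)))) 4
  rw [← h3, h2]
  simp only [List.foldl_map]

-- bounded-position prefix match ↔ substring containment, for nonempty keywords
theorem pv_pos_iff_isIn (sl kw : List Char) (hk : kw ≠ []) :
    (∃ i, i < sl.length ∧ PySem.Chars.startswith (List.drop i sl) kw = true)
      ↔ PySem.Chars.isIn kw sl = true := by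
  rw [← PySem.Chars.exists_prefix_drop_iff_isIn]
  constructor
  · rintro ⟨i, _, h⟩
    exact ⟨i, (PySem.Chars.startswith_iff _ _).mp h⟩
  · rintro ⟨j, h⟩
    by_cases hj : j < sl.length
    · exact ⟨j, hj, (PySem.Chars.startswith_iff _ _).mpr h⟩
    · exfalso
      rw [List.drop_eq_nil_of_le (by omega)] at h
      exact hk (List.prefix_nil.mp h)

theorem pv_kw_ne_nil : ∀ kp ∈ pvKwPr, kp.1.toList ≠ [] := by decide

theorem pv_kw_lt_four : ∀ kp ∈ pvKwPr, kp.2 < 4 := by decide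

theorem pv_mem_vals_iff (sl : List Char) (p : Nat) : p ∈ pvVals sl ↔ pvMatched sl p := by
  unfold pvVals pvMatched
  simp only [List.mem_map, List.mem_filter, List.mem_flatMap, List.mem_range]
  constructor
  · rintro ⟨a, ⟨⟨i, hi, kp, hkp, rfl⟩, hsw⟩, rfl⟩
    exact ⟨kp, hkp, rfl,
      (pv_pos_iff_isIn sl kp.1.toList (pv_kw_ne_nil kp hkp)).mp ⟨i, hi, hsw⟩⟩
  · rintro ⟨kp, hkp, rfl, hin⟩
    obtain ⟨i, hi, hsw⟩ := (pv_pos_iff_isIn sl kp.1.toList (pv_kw_ne_nil kp hkp)).mpr hin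
    exact ⟨(i, kp), ⟨⟨i, hi, kp, hkp, rfl⟩, hsw⟩, rfl⟩

theorem pv_matched_lt_four (sl : List Char) (p : Nat) (h : pvMatched sl p) : p < 4 := by
  obtain ⟨kp, hkp, rfl, _⟩ := h
  exact pv_kw_lt_four kp hkp

theorem pv_matched_iff_group (sl : List Char) (p : Nat) (hp : p < 4) :
    pvMatched sl p ↔ ((pvGroup p).any (fun kw => PySem.Chars.isIn kw.toList sl)) = true := by
  unfold pvMatched
  interval_cases p
  · simp [pvKwPr, pvGroup]
  · simp [pvKwPr, pvGroup]
  · simp [pvKwPr, pvGroup]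
  · simp [pvKwPr, pvGroup]

-- the if-chain over groups equals indexing the tag table at the minimum matched priority
theorem pv_chain_eq (sl : List Char) :
    (if ((pvGroup 0).any (fun kw => PySem.Chars.isIn kw.toList sl)) = true then "Wrong Number"
     else if ((pvGroup 1).any (fun kw => PySem.Chars.isIn kw.toList sl)) = true then "Not Interested"
     else if ((pvGroup 2).any (fun kw => PySem.Chars.isIn kw.toList sl)) = true then "Ask Later"
     else if ((pvGroup 3).any (fun kw => PySem.Chars.isIn kw.toList sl)) = true then "Interested"
     else "Unknown")
    = (if (pvVals sl).foldl min 4 < 4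
        then pvTags.getD ((pvVals sl).foldl min 4) "Unknown" else "Unknown") := by
  set r := (pvVals sl).foldl min 4 with hr
  have hmem := pv_foldl_min_mem (pvVals sl) 4
  have hC : ∀ p, p < 4 → (pvMatched sl p ↔ ((pvGroup p).any (fun kw => PySem.Chars.isIn kw.toList sl)) = true) :=
    fun p hp => pv_matched_iff_group sl p hp
  by_cases h0 : pvMatched sl 0
  · have hr0 : r = 0 := by
      have := pv_foldl_min_le_mem (pvVals sl) 4 0 ((pv_mem_vals_iff sl 0).mpr h0)
      omega
    rw [if_pos ((hC 0 (by omega)).mp h0), hr0]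
    rfl
  · rw [if_neg (fun hh => h0 ((hC 0 (by omega)).mpr hh))]
    by_cases h1 : pvMatched sl 1
    · have hr1 : r = 1 := by
        have hle := pv_foldl_min_le_mem (pvVals sl) 4 1 ((pv_mem_vals_iff sl 1).mpr h1)
        rcases hmem with h | h
        · omega
        · have hm := (pv_mem_vals_iff sl r).mp h
          have : r ≠ 0 := fun e => h0 (e ▸ hm)
          omega
      rw [if_pos ((hC 1 (by omega)).mp h1), hr1]
      rfl
    · rw [if_neg (fun hh => h1 ((hC 1 (by omega)).mpr hh))]
      by_cases h2 : pvMatched sl 2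
      · have hr2 : r = 2 := by
          have hle := pv_foldl_min_le_mem (pvVals sl) 4 2 ((pv_mem_vals_iff sl 2).mpr h2)
          rcases hmem with h | h
          · omega
          · have hm := (pv_mem_vals_iff sl r).mp h
            have : r ≠ 0 := fun e => h0 (e ▸ hm)
            have : r ≠ 1 := fun e => h1 (e ▸ hm)
            omega
        rw [if_pos ((hC 2 (by omega)).mp h2), hr2]
        rfl
      · rw [if_neg (fun hh => h2 ((hC 2 (by omega)).mpr hh))]
        by_cases h3 : pvMatched sl 3
        · have hr3 : r = 3 := by
            have hle := pv_foldl_min_le_mem (pvVals sl) 4 3 ((pv_mem_vals_iff sl 3).mpr h3)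
            rcases hmem with h | h
            · omega
            · have hm := (pv_mem_vals_iff sl r).mp h
              have : r ≠ 0 := fun e => h0 (e ▸ hm)
              have : r ≠ 1 := fun e => h1 (e ▸ hm)
              have : r ≠ 2 := fun e => h2 (e ▸ hm)
              omega
          rw [if_pos ((hC 3 (by omega)).mp h3), hr3]
          rfl
        · rw [if_neg (fun hh => h3 ((hC 3 (by omega)).mpr hh))]
          have hr4 : r = 4 := by
            rcases hmem with h | h
            · exact h
            · exfalso
              have hm := (pv_mem_vals_iff sl r).mp h
              have hlt := pv_matched_lt_four sl r hm
              interval_cases r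
              · exact h0 hm
              · exact h1 hm
              · exact h2 hm
              · exact h3 hm
          rw [hr4]
          rfl

-- ===== VERDICT (by name: the statement is the Claim_ definition above) =====
theorem tag_inbound_heuristic_spec : Claim_equal_tag_inbound_heuristic := by
  intro body _
  unfold Spec_tag_inbound_heuristic tag_inbound_heuristic tag_inbound_heuristic_alt
    pvLooksLikeOptOut
  simp only [pvOptOut, pv_s_fix]
  by_cases h : PySem.Str.lower (PySem.Str.strip body) = ""
  · simp [h]
  · simp only [h, if_false]
    by_cases hopt : PySem.Str.lower (PySem.Str.strip body)
        ∈ ["stop", "stopall", "unsubscribe", "cancel", "end", "quit"]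
    · simp [hopt]
    · simp only [hopt, decide_false, Bool.false_eq_true, if_false]
      have := pv_chain_eq (PySem.Str.lower (PySem.Str.strip body)).toList
      simp only [pvGroup] at this
      simpa [pv_best_eq] using this
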